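-- pv_equiv track=rewrite | github.com/msuhuh/slutkursen | Hammock_scripts/Map_motifs.py | len_mot
-- ===== SOURCE A (Python) =====
-- def len_mot(word):
--     if word == '*': # If motif is empty return 0
--         return 0
--     elif len(word) == 0: # If motif is empty return 0
--         return 0
--     elif word[0] == "[": # If motif has [X X X] counts as 1
--         a = 1
--         while word[a] != "]":
--                 a += 1
--         return 1 + len_mot(word[(a+1):])
--     else: # Else count 1 and move to next postion
--         return 1 + len_mot(word[1:])
-- ===== SOURCE B (Python) =====
-- def len_mot(word):
--     count = 0
--     inside = False
--     for ch in word: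
--         if inside:
--             inside = ch != ']'
--         else:
--             count += 1
--             inside = ch == '['
--     if word.endswith('*') and not inside:
--         count -= 1
--     return count
-- ===== Notes on version B (the rewrite author's own statement) =====
-- stated objective: faster
-- what changed: Replaces A's recursion with repeated string slicing and an inner bracket-scan by one forward fold over the characters with a boolean inside-brackets flag and a counter, plus a final endswith('*') adjustment.
import Mathlib
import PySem

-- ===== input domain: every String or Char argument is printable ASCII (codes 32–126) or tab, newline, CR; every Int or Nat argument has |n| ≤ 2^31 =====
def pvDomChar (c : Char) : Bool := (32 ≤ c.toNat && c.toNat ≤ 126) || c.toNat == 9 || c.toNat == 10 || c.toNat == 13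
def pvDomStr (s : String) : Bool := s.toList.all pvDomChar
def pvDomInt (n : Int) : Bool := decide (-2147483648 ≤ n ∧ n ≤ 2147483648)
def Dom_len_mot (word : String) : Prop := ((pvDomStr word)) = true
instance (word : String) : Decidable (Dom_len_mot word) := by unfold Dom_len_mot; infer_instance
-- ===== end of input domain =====

-- B replaces A's recursion-with-slicing by one forward fold with an inside-brackets flag: faster (O(n) vs O(n^2)).

-- ===== PORT A =====
-- A's while loop 'a = 1; while word[a] != "]": a += 1' followed by word[a+1:]:
-- drop everything up to and including the first ']' (on inputs where no ']' exists
-- Python raises IndexError; those inputs are excluded by Pre_ below).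
def skipBrA : List Char → List Char
  | [] => []
  | c :: rest => if c = ']' then rest else skipBrA rest

theorem skipBrA_length_le (l : List Char) : (skipBrA l).length ≤ l.length := by
  induction l with
  | nil => simp [skipBrA]
  | cons c rest ih =>
    simp only [skipBrA]
    split
    · simp
    · exact Nat.le_succ_of_le ih

def lenAuxA : List Char → Int
  | [] => 0  -- len(word) == 0 branch
  | c :: rest =>
    if c :: rest = ['*'] then 0                 -- word == '*' branch
    else if c = '[' then 1 + lenAuxA (skipBrA rest)   -- skip bracket group, recurse on slice
    else 1 + lenAuxA rest                       -- recurse on word[1:]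
  termination_by l => l.length
  decreasing_by
  · exact Nat.lt_succ_of_le (skipBrA_length_le rest)
  · simp

def len_mot (word : String) : Int := lenAuxA word.toList

-- ===== PORT B =====
-- One step of B's for-loop: state is (count, inside).
def stepB (s : Int × Bool) (ch : Char) : Int × Bool :=
  if s.2 then (s.1, decide (ch ≠ ']'))
  else (s.1 + 1, decide (ch = '['))

def len_mot_alt (word : String) : Int :=
  let s := word.toList.foldl stepB (0, false)
  if PySem.Str.endswith word "*" ∧ s.2 = false then s.1 - 1 else s.1

-- ===== PRECONDITION & SPEC =====
-- Pre_ excludes exactly the inputs on which Python A raises IndexError: a '[' with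
-- no ']' anywhere after it (A's while loop runs off the end of the string).
def Pre_len_mot (word : String) : Prop :=
  ∀ t ∈ word.toList.tails, t.head? = some '[' → ']' ∈ t.tail
instance (word : String) : Decidable (Pre_len_mot word) := by unfold Pre_len_mot; infer_instance
def pvWitness_len_mot : String := "ab[cd]e*"

def Spec_len_mot (word : String) (out : Int) : Prop := out = len_mot_alt word
instance (word : String) (out : Int) : Decidable (Spec_len_mot word out) := by unfold Spec_len_mot; infer_instance

-- ===== CLAIM =====
def Claim_equal_len_mot : Prop := ∀ (word : String), Dom_len_mot word → Pre_len_mot word → Spec_len_mot word (len_mot word)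

-- ===== LEMMAS AND PROOFS =====

-- Pre_ as a property of the character list, used on the suffixes A recurses through.
def PreL (l : List Char) : Prop := ∀ t ∈ l.tails, t.head? = some '[' → ']' ∈ t.tail

theorem preL_suffix {l l' : List Char} (h : l' <:+ l) (hp : PreL l) : PreL l' := by
  intro t ht
  exact hp t ((List.mem_tails _ _).mpr (((List.mem_tails _ _).mp ht).trans h))

theorem skipBrA_suffix (l : List Char) : skipBrA l <:+ l := by
  induction l with
  | nil => simp [skipBrA]
  | cons c rest ih =>
    simp only [skipBrA]
    split
    · exact (List.suffix_cons c rest)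
    · exact ih.trans (List.suffix_cons c rest)

-- Token count ignoring the '*' rule: what B's loop counts.
def countTok : List Char → Int
  | [] => 0
  | c :: rest =>
    if c = '[' then 1 + countTok (skipBrA rest)
    else 1 + countTok rest
  termination_by l => l.length
  decreasing_by
  · exact Nat.lt_succ_of_le (skipBrA_length_le rest)
  · simp

-- While inside brackets, the fold just scans to the first ']' — exactly skipBrA.
theorem fold_inside (rest : List Char) (h : ']' ∈ rest) (m : Int) :
    rest.foldl stepB (m, true) = (skipBrA rest).foldl stepB (m, false) := by
  induction rest with
  | nil => simp at h
  | cons c r ih =>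
    by_cases hc : c = ']'
    · subst hc
      simp [List.foldl_cons, stepB, skipBrA]
    · have hr : ']' ∈ r := by
        rcases List.mem_cons.mp h with h1 | h1
        · exact absurd h1.symm hc
        · exact h1
      simp [List.foldl_cons, stepB, hc, skipBrA, ih hr]

-- Under Pre, B's fold from (k, false) counts tokens and ends outside brackets.
theorem fold_tokens : ∀ (n : Nat) (l : List Char), l.length ≤ n → PreL l → ∀ (k : Int),
    l.foldl stepB (k, false) = (k + countTok l, false) := by
  intro n
  induction n with
  | zero =>
    intro l hl _ k
    have : l = [] := by cases l <;> simp_all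
    subst this
    simp [countTok]
  | succ n ih =>
    intro l hl hp k
    cases l with
    | nil => simp [countTok]
    | cons c rest =>
      have hlen : rest.length ≤ n := by simpa using Nat.le_of_succ_le_succ hl
      by_cases hc : c = '['
      · subst hc
        have hbr : ']' ∈ rest := by
          have := hp ('[' :: rest) ((List.mem_tails _ _).mpr List.suffix_rfl)
          simpa using this
        have hps : PreL (skipBrA rest) :=
          preL_suffix ((skipBrA_suffix rest).trans (List.suffix_cons _ _)) hp
        have hls : (skipBrA rest).length ≤ n := le_trans (skipBrA_length_le rest) hlen
        rw [List.foldl_cons,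
            show stepB (k, false) '[' = (k + 1, true) from by simp [stepB],
            fold_inside rest hbr, ih _ hls hps]
        simp [countTok]
        ring
      · have hpr : PreL rest := preL_suffix (List.suffix_cons c rest) hp
        rw [List.foldl_cons,
            show stepB (k, false) c = (k + 1, false) from by simp [stepB, hc],
            ih rest hlen hpr]
        simp [countTok, hc]
        ring

-- skipBrA keeps the last element (or empties the list with last = ']').
theorem skipBrA_getLast (l : List Char) (h : ']' ∈ l) :
    (skipBrA l).getLast? = l.getLast? ∨ (skipBrA l = [] ∧ l.getLast? = some ']') := by
  induction l with
  | nil => simp at h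
  | cons c r ih =>
    by_cases hc : c = ']'
    · subst hc
      cases r with
      | nil => right; simp [skipBrA]
      | cons x xs => left; simp [skipBrA, List.getLast?_cons_cons]
    · have hr : ']' ∈ r := by
        rcases List.mem_cons.mp h with h1 | h1
        · exact absurd h1.symm hc
        · exact h1
      have hrne : r ≠ [] := by rintro rfl; simp at hr
      rcases ih hr with h1 | ⟨h1, h2⟩
      · left
        rw [show skipBrA (c :: r) = skipBrA r from by simp [skipBrA, hc], h1]
        cases r with
        | nil => exact absurd rfl hrne
        | cons x xs => simp [List.getLast?_cons_cons]
      · right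
        constructor
        · simpa [skipBrA, hc] using h1
        · cases r with
          | nil => exact absurd rfl hrne
          | cons x xs => rw [List.getLast?_cons_cons]; exact h2

-- A's count is the token count minus one exactly when the word ends in '*'.
theorem lenAuxA_eq : ∀ (n : Nat) (l : List Char), l.length ≤ n → PreL l →
    lenAuxA l = countTok l - (if l.getLast? = some '*' then 1 else 0) := by
  intro n
  induction n with
  | zero =>
    intro l hl _
    have : l = [] := by cases l <;> simp_all
    subst this
    simp [lenAuxA, countTok]
  | succ n ih =>
    intro l hl hp
    cases l with
    | nil => simp [lenAuxA, countTok]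
    | cons c rest =>
      have hlen : rest.length ≤ n := by simpa using Nat.le_of_succ_le_succ hl
      by_cases hstar : c :: rest = ['*']
      · rw [hstar]
        simp [lenAuxA, countTok]
      · by_cases hc : c = '['
        · subst hc
          have hbr : ']' ∈ rest := by
            have := hp ('[' :: rest) ((List.mem_tails _ _).mpr List.suffix_rfl)
            simpa using this
          have hps : PreL (skipBrA rest) :=
            preL_suffix ((skipBrA_suffix rest).trans (List.suffix_cons _ _)) hp
          have hls : (skipBrA rest).length ≤ n := le_trans (skipBrA_length_le rest) hlen
          have hrne : rest ≠ [] := by rintro rfl; simp at hbr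
          rw [show lenAuxA ('[' :: rest) = 1 + lenAuxA (skipBrA rest) from by
                rw [lenAuxA]; simp [hstar],
              show countTok ('[' :: rest) = 1 + countTok (skipBrA rest) from by
                rw [countTok]; simp,
              ih _ hls hps]
          have hlast : ('[' :: rest).getLast? = rest.getLast? := by
            cases rest with
            | nil => exact absurd rfl hrne
            | cons x xs => simp [List.getLast?_cons_cons]
          rcases skipBrA_getLast rest hbr with h1 | ⟨h1, h2⟩
          · rw [hlast, ← h1]; ring
          · rw [h1, hlast, h2]
            simp
        · have hpr : PreL rest := preL_suffix (List.suffix_cons c rest) hp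
          rw [show lenAuxA (c :: rest) = 1 + lenAuxA rest from by
                rw [lenAuxA]; simp [hstar, hc],
              show countTok (c :: rest) = 1 + countTok rest from by
                rw [countTok]; simp [hc],
              ih rest hlen hpr]
          cases rest with
          | nil =>
            have : c ≠ '*' := fun h => hstar (by rw [h])
            simp [this, countTok]
          | cons x xs =>
            rw [List.getLast?_cons_cons]
            ring

theorem endswith_star (w : String) :
    (PySem.Str.endswith w "*" = true) ↔ w.toList.getLast? = some '*' := by
  rw [show PySem.Str.endswith w "*" = PySem.Chars.endswith w.toList "*".toList from by simp]
  rw [PySem.Chars.endswith_iff]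
  constructor
  · rintro ⟨s, hs⟩
    rw [← hs]
    simp
  · intro h
    rcases List.getLast?_eq_some_iff.mp h with ⟨s, hs⟩
    exact ⟨s, hs.symm⟩

-- ===== VERDICT =====
theorem len_mot_spec : Claim_equal_len_mot := by
  intro word _ hpre
  unfold Spec_len_mot len_mot len_mot_alt
  rw [fold_tokens word.toList.length word.toList le_rfl hpre 0]
  by_cases hst : PySem.Str.endswith word "*" = true
  · simp only [hst]
    rw [lenAuxA_eq word.toList.length word.toList le_rfl hpre,
        if_pos ((endswith_star word).mp hst)]
    simp
  · simp only [hst]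
    rw [lenAuxA_eq word.toList.length word.toList le_rfl hpre,
        if_neg (fun h => hst ((endswith_star word).mpr h))]
    simp
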